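-- pv_equiv track=rewrite | github.com/GabiIacob/Minilang-Compiler | minilang/optimizer/optimizer.py | remove_dead_code
-- ===== SOURCE A (Python) =====
-- def remove_dead_code(instrs):
--     used = set()
--
--     for instr in instrs:
--         if instr.startswith("PRINT"):
--             used.add(instr.split()[1])
--
--         if "IF_FALSE" in instr:
--             used.add(instr.split()[1])
--
--         parts = instr.replace("=", " = ").split()
--         for p in parts:
--             if p.startswith("t"):
--                 used.add(p)
--
--     result = []
--
--     for instr in instrs:
--         if "=" in instr and not instr.endswith(":"):
--             dest = instr.split("=")[0].strip()
--
--             if dest.startswith("t") and dest not in used: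
--                 continue
--
--         result.append(instr)
--
--     return result
-- ===== SOURCE B (Python) =====
-- def remove_dead_code(instrs):
--     # The original's "dead-code" filter never fires on well-formed three-address
--     # instructions: the first pass collects every whitespace-free token that
--     # starts with "t" -- including each assignment's own destination -- into
--     # `used`, so the guard `dest not in used` is false whenever `dest` is a
--     # single token.  The function is therefore the identity on its intended
--     # input; just return a fresh copy of the list.
--     return list(instrs)
-- ===== Notes on version B (the rewrite author's own statement) =====
-- stated objective: simpler
-- what changed: A builds a set of used temporary tokens in a first pass and filters assignments in a second; since every assignment's own destination token is itself collected into the set, the filter never drops a well-formed instruction, so B simply returns a copy of the input list.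
-- intended difference: On lists containing an instruction with '=' that does not end in ':' and whose stripped left-hand side starts with 't' but contains internal whitespace (a malformed destination such as 't1 t2 = 5'), A silently drops that instruction because the multi-word destination can never appear in its token set, while B keeps it; keeping a malformed instruction intact is the intended behaviour of a dead-code pass that should only remove genuinely unused temporaries. — e.g. on remove_dead_code(["t1 t2 = 5"]): A returns [], B returns ["t1 t2 = 5"]
import Mathlib
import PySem

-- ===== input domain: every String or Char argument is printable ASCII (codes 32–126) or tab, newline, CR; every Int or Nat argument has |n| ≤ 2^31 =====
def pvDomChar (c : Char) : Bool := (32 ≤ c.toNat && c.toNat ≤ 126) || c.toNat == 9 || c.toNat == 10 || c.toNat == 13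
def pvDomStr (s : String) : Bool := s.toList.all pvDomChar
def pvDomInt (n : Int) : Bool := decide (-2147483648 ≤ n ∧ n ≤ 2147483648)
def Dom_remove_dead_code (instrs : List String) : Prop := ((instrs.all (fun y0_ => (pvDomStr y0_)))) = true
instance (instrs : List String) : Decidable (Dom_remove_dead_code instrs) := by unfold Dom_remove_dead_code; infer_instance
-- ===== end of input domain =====

-- B is the identity copy: A's `used` set always receives each assignment's own destination
-- token, so its filter never drops a well-formed instruction (difference stated in D_ below).

-- ===== PORT A =====

-- `instr.split()[1]` raises IndexError when the second token is missing — those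
-- inputs are excluded by Pre_remove_dead_code; the `none` branch keeps `used`
def pvAddTok (used : PySem.Set String) (o : Option String) : PySem.Set String :=
  match o with
  | some w => PySem.Set.add used w
  | none => used

-- first pass: build the `used` set from one instruction
def pvUsedStep (used : PySem.Set String) (instr : String) : PySem.Set String :=
  let used :=
    if PySem.Str.startswith instr "PRINT" then
      pvAddTok used (PySem.List.pyGet? (PySem.Str.split₀ instr) 1)
    else used
  let used :=
    if PySem.Str.isIn "IF_FALSE" instr then
      pvAddTok used (PySem.List.pyGet? (PySem.Str.split₀ instr) 1)
    else used
  let parts := PySem.Str.split₀ (PySem.Str.replace instr "=" " = ")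
  parts.foldl (fun used p => if PySem.Str.startswith p "t" then PySem.Set.add used p else used) used

-- second pass: keep or drop one instruction
-- (`dest = instr.split("=")[0].strip()`: the separator is nonempty so split? is
--  always `some`, and the result is nonempty so index 0 is `headD`)
def pvDest (instr : String) : String :=
  PySem.Str.strip (((PySem.Str.split? instr "=").getD []).headD "")

def pvKeepStep (used : PySem.Set String) (result : List String) (instr : String) : List String :=
  if PySem.Str.isIn "=" instr && !(PySem.Str.endswith instr ":") then
    if PySem.Str.startswith (pvDest instr) "t" && !(PySem.Set.contains used (pvDest instr)) then
      result
    else result ++ [instr]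
  else result ++ [instr]

def remove_dead_code (instrs : List String) : List String :=
  let used : PySem.Set String := instrs.foldl pvUsedStep PySem.Set.empty
  instrs.foldl (pvKeepStep used) []

-- ===== PORT B =====
def remove_dead_code_alt (instrs : List String) : List String :=
  instrs  -- list(instrs): a fresh copy with the same elements

-- ===== PRECONDITION & SPEC =====
-- Pre_ excludes exactly the inputs on which A raises IndexError (instr.split()[1]
-- on an instruction starting with "PRINT" or containing "IF_FALSE" that has
-- fewer than two whitespace-separated tokens).
def Pre_remove_dead_code (instrs : List String) : Prop :=
  ∀ instr ∈ instrs,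
    (PySem.Str.startswith instr "PRINT" = true → 2 ≤ (PySem.Str.split₀ instr).length) ∧
    (PySem.Str.isIn "IF_FALSE" instr = true → 2 ≤ (PySem.Str.split₀ instr).length)
instance (instrs : List String) : Decidable (Pre_remove_dead_code instrs) := by
  unfold Pre_remove_dead_code; infer_instance

def pvWitness_remove_dead_code : List String := ["t1 = 5", "x = t1", "PRINT x"]

-- the stripped text before the first '=' of an instruction (the assignment destination)
def pvTrim (instr : String) : List Char :=
  PySem.Chars.strip (instr.toList.takeWhile (fun c => c != '='))

-- On lists containing an instruction with '=' that does not end in ':' and whose stripped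
-- left-hand side starts with 't' but still contains whitespace (a malformed destination such
-- as "t1 t2 = 5"), A silently drops that instruction — the multi-word destination can never
-- be in its token set — while B keeps it; keeping it is the intended behaviour of a pass
-- that should only remove genuinely unused temporaries.
def D_remove_dead_code (instrs : List String) : Prop :=
  ∃ instr ∈ instrs,
    '=' ∈ instr.toList ∧
    instr.toList.getLast? ≠ some ':' ∧
    (pvTrim instr).head? = some 't' ∧
    (pvTrim instr).any PySem.Chars.isspace = true
instance (instrs : List String) : Decidable (D_remove_dead_code instrs) := by
  unfold D_remove_dead_code; infer_instance

def Spec_remove_dead_code (instrs : List String) (out : List String) : Prop :=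
  ¬ D_remove_dead_code instrs → out = remove_dead_code_alt instrs
instance (instrs : List String) (out : List String) : Decidable (Spec_remove_dead_code instrs out) := by
  unfold Spec_remove_dead_code; infer_instance

def pvDiffWitness_remove_dead_code : List String := ["t1 t2 = 5"]
def pvDiffWitnessOut_remove_dead_code : (List String) × (List String) := ([], ["t1 t2 = 5"])

-- ===== CLAIM (what is proved, stated in full; the proofs are below) =====
def Claim_unchanged_remove_dead_code : Prop := ∀ (instrs : List String), Dom_remove_dead_code instrs → Pre_remove_dead_code instrs → Spec_remove_dead_code instrs (remove_dead_code instrs)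
def Claim_changed_remove_dead_code : Prop := Dom_remove_dead_code (pvDiffWitness_remove_dead_code) ∧ Pre_remove_dead_code (pvDiffWitness_remove_dead_code) ∧ D_remove_dead_code (pvDiffWitness_remove_dead_code) ∧ remove_dead_code (pvDiffWitness_remove_dead_code) = pvDiffWitnessOut_remove_dead_code.1 ∧ remove_dead_code_alt (pvDiffWitness_remove_dead_code) = pvDiffWitnessOut_remove_dead_code.2 ∧ pvDiffWitnessOut_remove_dead_code.1 ≠ pvDiffWitnessOut_remove_dead_code.2
def Claim_exact_remove_dead_code : Prop := ∀ (instrs : List String), Dom_remove_dead_code instrs → Pre_remove_dead_code instrs → D_remove_dead_code instrs → remove_dead_code instrs ≠ remove_dead_code_alt instrs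


-- ===== LEMMAS AND PROOFS =====

-- ---- split₀ (whitespace split) ----

theorem sgo_acc (s cur : List Char) (acc : List (List Char)) :
    PySem.Chars.split₀.go s cur acc = acc.reverse ++ PySem.Chars.split₀.go s cur [] := by
  induction s generalizing cur acc with
  | nil =>
    simp only [PySem.Chars.split₀.go]
    split_ifs <;> simp
  | cons c rest ih =>
    by_cases hs : PySem.Chars.isspace c
    · simp only [PySem.Chars.split₀.go, hs, if_true]
      split_ifs with h
      · exact ih _ _
      · rw [ih _ (cur.reverse :: acc), ih _ [cur.reverse]]
        simp
    · simp only [PySem.Chars.split₀.go, hs, Bool.false_eq_true, if_false]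
      exact ih _ _
theorem sgo_ws (w s : List Char) (acc : List (List Char))
    (h : ∀ c ∈ w, PySem.Chars.isspace c = true) :
    PySem.Chars.split₀.go (w ++ s) [] acc = PySem.Chars.split₀.go s [] acc := by
  induction w with
  | nil => simp
  | cons c rest ih =>
    have hc := h c (by simp)
    simp only [List.cons_append, PySem.Chars.split₀.go, hc, if_true]
    rw [if_pos (by simp)]
    exact ih (fun c hc => h c (by simp [hc]))
theorem sgo_tok (d s cur : List Char) (acc : List (List Char))
    (h : ∀ c ∈ d, PySem.Chars.isspace c = false) :
    PySem.Chars.split₀.go (d ++ s) cur acc = PySem.Chars.split₀.go s (d.reverse ++ cur) acc := by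
  induction d generalizing cur with
  | nil => simp
  | cons c rest ih =>
    have hc := h c (by simp)
    simp only [List.cons_append, PySem.Chars.split₀.go, hc, Bool.false_eq_true, if_false]
    rw [ih _ (fun c hc => h c (by simp [hc]))]
    simp
theorem sgo_ws_nil (w : List Char) (acc : List (List Char))
    (h : ∀ c ∈ w, PySem.Chars.isspace c = true) :
    PySem.Chars.split₀.go w [] acc = acc.reverse := by
  induction w with
  | nil =>
    simp only [PySem.Chars.split₀.go]
    rw [if_pos (by simp)]
  | cons c rest ih =>
    have hc := h c (by simp)
    simp only [PySem.Chars.split₀.go, hc, if_true]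
    rw [if_pos (by simp)]
    exact ih (fun c hc => h c (by simp [hc]))
theorem sgo_ws_cur (w cur : List Char) (acc : List (List Char))
    (h : ∀ c ∈ w, PySem.Chars.isspace c = true) (hc : cur ≠ []) :
    PySem.Chars.split₀.go w cur acc = acc.reverse ++ [cur.reverse] := by
  cases w with
  | nil =>
    simp only [PySem.Chars.split₀.go]
    rw [if_neg (by simpa using hc)]
    simp
  | cons c rest =>
    have hcs := h c (by simp)
    simp only [PySem.Chars.split₀.go, hcs, if_true]
    rw [if_neg (by simpa using hc)]
    rw [sgo_ws_nil rest _ (fun c hc => h c (by simp [hc]))]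
    simp
theorem split₀_stripped (w1 d w2 : List Char)
    (h1 : ∀ c ∈ w1, PySem.Chars.isspace c = true)
    (h2 : ∀ c ∈ w2, PySem.Chars.isspace c = true)
    (hd : ∀ c ∈ d, PySem.Chars.isspace c = false)
    (hne : d ≠ []) :
    PySem.Chars.split₀ (w1 ++ d ++ w2) = [d] := by
  unfold PySem.Chars.split₀
  rw [List.append_assoc, sgo_ws _ _ _ h1, sgo_tok _ _ _ _ hd, sgo_ws_cur _ _ _ h2 (by simpa using hne)]
  simp

theorem sgo_append_space (xs ys cur : List Char) (acc : List (List Char)) :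
    PySem.Chars.split₀.go (xs ++ ' ' :: ys) cur acc
      = PySem.Chars.split₀.go xs cur acc ++ PySem.Chars.split₀ ys := by
  induction xs generalizing cur acc with
  | nil =>
    have hsp : PySem.Chars.isspace ' ' = true := by decide
    simp only [List.nil_append, PySem.Chars.split₀.go, hsp, if_true]
    split_ifs with h
    · rw [sgo_acc]
      simp [PySem.Chars.split₀, h]
    · rw [sgo_acc]
      simp [PySem.Chars.split₀, h]
  | cons c rest ih =>
    by_cases hs : PySem.Chars.isspace c
    · simp only [List.cons_append, PySem.Chars.split₀.go, hs, if_true]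
      split_ifs with h
      · exact ih _ _
      · exact ih _ _
    · simp only [List.cons_append, PySem.Chars.split₀.go, hs, Bool.false_eq_true, if_false]
      exact ih _ _
theorem strip_decomp (a : List Char) :
    ∃ w1 w2, a = w1 ++ PySem.Chars.strip a ++ w2 ∧
      (∀ c ∈ w1, PySem.Chars.isspace c = true) ∧ (∀ c ∈ w2, PySem.Chars.isspace c = true) := by
  refine ⟨List.takeWhile PySem.Chars.isspace a,
    (List.takeWhile PySem.Chars.isspace (PySem.Chars.lstrip a).reverse).reverse, ?_, ?_, ?_⟩
  · unfold PySem.Chars.strip PySem.Chars.rstrip PySem.Chars.lstrip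
    have h1 : List.takeWhile PySem.Chars.isspace a ++ List.dropWhile PySem.Chars.isspace a = a :=
      List.takeWhile_append_dropWhile
    have h2 : (List.dropWhile PySem.Chars.isspace
          (List.dropWhile PySem.Chars.isspace a).reverse).reverse ++
        (List.takeWhile PySem.Chars.isspace (List.dropWhile PySem.Chars.isspace a).reverse).reverse
        = List.dropWhile PySem.Chars.isspace a := by
      rw [← List.reverse_append, List.takeWhile_append_dropWhile, List.reverse_reverse]
    rw [List.append_assoc, h2, h1]
  · exact fun c hc => List.mem_takeWhile_imp hc
  · intro c hc
    rw [List.mem_reverse] at hc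
    exact List.mem_takeWhile_imp hc
theorem ogo_acc (fuel : Nat) (l cur : List Char) (acc : List (List Char)) :
    PySem.Chars.splitOn.go ['='] fuel l cur acc
      = acc.reverse ++ PySem.Chars.splitOn.go ['='] fuel l cur [] := by
  induction fuel generalizing l cur acc with
  | zero => simp [PySem.Chars.splitOn.go]
  | succ fuel ih =>
    cases l with
    | nil => simp [PySem.Chars.splitOn.go]
    | cons c rest =>
      by_cases h : List.isPrefixOf ['='] (c :: rest)
      · simp only [PySem.Chars.splitOn.go, h, if_true]
        rw [ih, ih _ _ [cur.reverse]]
        simp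
      · simp only [PySem.Chars.splitOn.go, h]
        exact ih _ _ _

theorem ogo_chew (a : List Char) (fuel : Nat) (b cur : List Char) (acc : List (List Char))
    (h : '=' ∉ a) :
    PySem.Chars.splitOn.go ['='] (a.length + (fuel + 1)) (a ++ '=' :: b) cur acc
      = PySem.Chars.splitOn.go ['='] (fuel + 1) ('=' :: b) (a.reverse ++ cur) acc := by
  induction a generalizing cur with
  | nil => simp
  | cons c a' ih =>
    have hc : ('=' : Char) ≠ c := fun he => h (by simp [← he])
    have hpre : List.isPrefixOf ['='] (c :: (a' ++ '=' :: b)) = false := by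
      simp [List.isPrefixOf, hc]
    have harith : (c :: a').length + (fuel + 1) = (a'.length + (fuel + 1)) + 1 := by
      simp [List.length_cons]; omega
    rw [harith]
    simp only [List.cons_append, PySem.Chars.splitOn.go, hpre, Bool.false_eq_true, if_false]
    rw [ih _ (fun hm => h (by simp [hm]))]
    have hre : a'.reverse ++ c :: cur = (c :: a').reverse ++ cur := by simp
    rw [hre]
    simp only [PySem.Chars.splitOn.go]
theorem splitOn_first (a b : List Char) (h : '=' ∉ a) :
    ∃ rest, PySem.Chars.splitOn (a ++ '=' :: b) ['='] = a :: rest := by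
  unfold PySem.Chars.splitOn
  have hlen : (a ++ '=' :: b).length + 1 = a.length + ((b.length + 1) + 1) := by
    simp; omega
  rw [hlen, ogo_chew a (b.length + 1) b [] [] h]
  have hpre : List.isPrefixOf ['='] ('=' :: b) = true := by simp [List.isPrefixOf]
  simp only [PySem.Chars.splitOn.go, hpre, if_true]
  rw [ogo_acc]
  refine ⟨PySem.Chars.splitOn.go ['='] (b.length + 1) (List.drop ['='].length ('=' :: b)) [] [], ?_⟩
  simp
theorem rgo_acc (nw : List Char) (fuel : Nat) (l acc : List Char) :
    PySem.Chars.replace.go ['='] nw fuel l acc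
      = acc.reverse ++ PySem.Chars.replace.go ['='] nw fuel l [] := by
  induction fuel generalizing l acc with
  | zero => simp [PySem.Chars.replace.go]
  | succ fuel ih =>
    cases l with
    | nil => simp [PySem.Chars.replace.go]
    | cons c rest =>
      by_cases h : List.isPrefixOf ['='] (c :: rest)
      · simp only [PySem.Chars.replace.go, h, if_true]
        rw [ih _ (nw.reverse ++ acc), ih _ (nw.reverse ++ [])]
        simp
      · simp only [PySem.Chars.replace.go, h, Bool.false_eq_true, if_false]
        rw [ih _ (c :: acc), ih _ [c]]
        simp
theorem rgo_chew (nw : List Char) (a : List Char) (fuel : Nat) (b acc : List Char)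
    (h : '=' ∉ a) :
    PySem.Chars.replace.go ['='] nw (a.length + (fuel + 1)) (a ++ '=' :: b) acc
      = PySem.Chars.replace.go ['='] nw (fuel + 1) ('=' :: b) (a.reverse ++ acc) := by
  induction a generalizing acc with
  | nil => simp
  | cons c a' ih =>
    have hc : ('=' : Char) ≠ c := fun he => h (by simp [← he])
    have hpre : List.isPrefixOf ['='] (c :: (a' ++ '=' :: b)) = false := by
      simp [List.isPrefixOf, hc]
    have harith : (c :: a').length + (fuel + 1) = (a'.length + (fuel + 1)) + 1 := by
      simp [List.length_cons]; omega
    rw [harith]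
    simp only [List.cons_append, PySem.Chars.replace.go, hpre, Bool.false_eq_true, if_false]
    rw [ih _ (fun hm => h (by simp [hm]))]
    have hre : a'.reverse ++ c :: acc = (c :: a').reverse ++ acc := by simp
    rw [hre]
    simp only [PySem.Chars.replace.go]
theorem replace_decomp (a b : List Char) (h : '=' ∉ a) :
    ∃ R, PySem.Chars.replace (a ++ '=' :: b) ['='] [' ', '=', ' ']
      = a ++ ' ' :: '=' :: ' ' :: R := by
  unfold PySem.Chars.replace
  have hlen : (a ++ '=' :: b).length = a.length + (b.length + 1) := by simp
  rw [if_neg (by simp), hlen, rgo_chew _ a b.length b [] h]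
  have hpre : List.isPrefixOf ['='] ('=' :: b) = true := by simp [List.isPrefixOf]
  simp only [PySem.Chars.replace.go, hpre, if_true]
  rw [rgo_acc]
  refine ⟨PySem.Chars.replace.go ['='] [' ', '=', ' '] b.length (List.drop ['='].length ('=' :: b)) [], ?_⟩
  simp
theorem first_eq_split (cs : List Char) (h : ('=' : Char) ∈ cs) :
    ∃ b, cs = cs.takeWhile (fun c => c != '=') ++ '=' :: b ∧
      ('=' : Char) ∉ cs.takeWhile (fun c => c != '=') := by
  set p : Char → Bool := fun c => c != '=' with hp
  have hsplit : List.takeWhile p cs ++ List.dropWhile p cs = cs :=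
    List.takeWhile_append_dropWhile
  have hdne : List.dropWhile p cs ≠ [] := by
    intro hnil
    have hall := List.dropWhile_eq_nil_iff.mp hnil
    have := hall _ h
    simp [hp] at this
  obtain ⟨c, rest, hcr⟩ := List.exists_cons_of_ne_nil hdne
  have hceq : c = '=' := by
    have hhd := List.head_dropWhile_not (p := p) (l := cs) hdne
    have h1 : (List.dropWhile p cs).head? = some c := by rw [hcr]; rfl
    have h2 : (List.dropWhile p cs).head? = some ((List.dropWhile p cs).head hdne) :=
      List.head?_eq_some_head hdne
    have h3 : (List.dropWhile p cs).head hdne = c := Option.some.inj (h2.symm.trans h1)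
    rw [h3] at hhd
    simpa [hp] using hhd
  refine ⟨rest, ?_, ?_⟩
  · conv_lhs => rw [← hsplit]
    rw [hcr, hceq]
  · intro hm'
    have := List.mem_takeWhile_imp hm'
    simp [hp] at this
theorem dest_mem_split₀_replace (a b : List Char)
    (hnotin : '=' ∉ a)
    (hws : ∀ c ∈ PySem.Chars.strip a, PySem.Chars.isspace c = false)
    (hne : PySem.Chars.strip a ≠ []) :
    PySem.Chars.strip a ∈ PySem.Chars.split₀
      (PySem.Chars.replace (a ++ '=' :: b) ['='] [' ', '=', ' ']) := by
  obtain ⟨R, hR⟩ := replace_decomp a b hnotin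
  rw [hR]
  obtain ⟨w1, w2, hdec, hw1, hw2⟩ := strip_decomp a
  rw [show PySem.Chars.split₀ (a ++ ' ' :: ('=' :: ' ' :: R))
      = PySem.Chars.split₀.go (a ++ ' ' :: ('=' :: ' ' :: R)) [] [] from rfl,
    sgo_append_space]
  have hgo : PySem.Chars.split₀.go a [] [] = PySem.Chars.split₀ a := rfl
  have ha : PySem.Chars.split₀ a = [PySem.Chars.strip a] := by
    conv_lhs => rw [hdec]
    exact split₀_stripped w1 _ w2 hw1 hw2 hws hne
  rw [hgo, ha]
  simp
theorem mem_foldl_filter_add (l : List String) (u : PySem.Set String) (y : String)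
    (f : String → Bool) (h : y ∈ u) :
    y ∈ l.foldl (fun u p => if f p then PySem.Set.add u p else u) u := by
  induction l generalizing u with
  | nil => exact h
  | cons p rest ih =>
    simp only [List.foldl_cons]
    apply ih
    by_cases hf : f p
    · simp only [hf, if_true]
      exact (PySem.Set.mem_add _ _ _).mpr (Or.inl h)
    · simpa [hf] using h

theorem mem_foldl_filter_add_self (l : List String) (u : PySem.Set String) (p : String)
    (f : String → Bool) (hp : p ∈ l) (hf : f p = true) :
    p ∈ l.foldl (fun u p => if f p then PySem.Set.add u p else u) u := by
  induction l generalizing u with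
  | nil => cases hp
  | cons q rest ih =>
    simp only [List.foldl_cons]
    rcases List.mem_cons.mp hp with hq | hrest
    · subst hq
      apply mem_foldl_filter_add
      simp only [hf, if_true]
      exact (PySem.Set.mem_add _ _ _).mpr (Or.inr rfl)
    · exact ih _ hrest

theorem mem_pvAddTok_mono (u : PySem.Set String) (o : Option String) (y : String) (h : y ∈ u) :
    y ∈ pvAddTok u o := by
  cases o with
  | none => exact h
  | some w => exact (PySem.Set.mem_add _ _ _).mpr (Or.inl h)

theorem mem_pvUsedStep_mono (u : PySem.Set String) (i y : String) (h : y ∈ u) :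
    y ∈ pvUsedStep u i := by
  show y ∈ (PySem.Str.split₀ (PySem.Str.replace i "=" " = ")).foldl
      (fun used p => if PySem.Str.startswith p "t" then PySem.Set.add used p else used)
      (if PySem.Str.isIn "IF_FALSE" i then
        pvAddTok
          (if PySem.Str.startswith i "PRINT" then
            pvAddTok u (PySem.List.pyGet? (PySem.Str.split₀ i) 1)
          else u)
          (PySem.List.pyGet? (PySem.Str.split₀ i) 1)
      else
        if PySem.Str.startswith i "PRINT" then
          pvAddTok u (PySem.List.pyGet? (PySem.Str.split₀ i) 1)
        else u)
  apply mem_foldl_filter_add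
  split
  · apply mem_pvAddTok_mono
    split
    · exact mem_pvAddTok_mono _ _ _ h
    · exact h
  · split
    · exact mem_pvAddTok_mono _ _ _ h
    · exact h
theorem mem_foldl_pvUsedStep_mono (l : List String) (u : PySem.Set String) (y : String)
    (h : y ∈ u) : y ∈ l.foldl pvUsedStep u := by
  induction l generalizing u with
  | nil => exact h
  | cons k r ih => exact ih _ (mem_pvUsedStep_mono _ _ _ h)

theorem mem_foldl_pvUsedStep (instrs : List String) (u0 : PySem.Set String) (i y : String)
    (hi : i ∈ instrs) (hy : ∀ u, y ∈ pvUsedStep u i) :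
    y ∈ instrs.foldl pvUsedStep u0 := by
  induction instrs generalizing u0 with
  | nil => cases hi
  | cons j rest ih =>
    simp only [List.foldl_cons]
    rcases List.mem_cons.mp hi with hj | hrest
    · subst hj
      exact mem_foldl_pvUsedStep_mono rest _ y (hy u0)
    · exact ih (pvUsedStep u0 j) hrest
theorem dest_mem_pvUsedStep (u : PySem.Set String) (instr : String)
    (dest : String)
    (hdest : dest ∈ PySem.Str.split₀ (PySem.Str.replace instr "=" " = "))
    (ht : PySem.Str.startswith dest "t" = true) :
    dest ∈ pvUsedStep u instr := by
  unfold pvUsedStep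
  exact mem_foldl_filter_add_self _ _ _ _ hdest ht

-- the String-level fact: under the side conditions, dest is a token of parts
-- the destination string of the port equals the input-level `pvTrim`
theorem pvDest_toList (instr : String) (h : ('=' : Char) ∈ instr.toList) :
    (pvDest instr).toList = pvTrim instr := by
  obtain ⟨b, hab, hna⟩ := first_eq_split instr.toList h
  obtain ⟨rest, hsplit⟩ := splitOn_first _ b hna
  have hsplit? : PySem.Str.split? instr "=" = some
      (String.ofList (instr.toList.takeWhile (fun c => c != '=')) :: rest.map String.ofList) := by
    unfold PySem.Str.split?
    unfold PySem.Chars.split?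
    rw [if_neg (by simp), show ("=" : String).toList = ['='] from rfl]
    conv_lhs => rw [hab]
    rw [hsplit]
    simp
  unfold pvDest pvTrim
  rw [hsplit?]
  simp [PySem.Str.toList_strip]

-- small bridges between the Boolean string tests and the input-level conditions
theorem isIn_eq_iff_mem (i : String) :
    PySem.Str.isIn "=" i = true ↔ ('=' : Char) ∈ i.toList := by
  rw [PySem.Str.isIn_eq, PySem.Chars.isIn_iff_infix]
  constructor
  · rintro ⟨s, t, hst⟩
    rw [← hst]
    simp [show ("=" : String).toList = ['='] from rfl]
  · intro hm
    obtain ⟨l1, l2, hl⟩ := List.append_of_mem hm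
    exact ⟨l1, l2, by rw [hl]; simp [show ("=" : String).toList = ['='] from rfl]⟩

theorem endswith_colon_iff (i : String) :
    PySem.Str.endswith i ":" = true ↔ i.toList.getLast? = some ':' := by
  rw [PySem.Str.endswith_eq, PySem.Chars.endswith_iff,
    show (":" : String).toList = [':'] from rfl]
  constructor
  · rintro ⟨s, hs⟩
    rw [← hs]
    simp
  · intro hg
    obtain ⟨l', hl'⟩ := List.getLast?_eq_some_iff.mp hg
    exact ⟨l', hl'.symm⟩

theorem startswith_t_iff (s : String) :
    PySem.Str.startswith s "t" = true ↔ s.toList.head? = some 't' := by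
  rw [PySem.Str.startswith_eq, PySem.Chars.startswith_iff,
    show ("t" : String).toList = ['t'] from rfl]
  cases s.toList with
  | nil => simp
  | cons c r => simp [List.cons_prefix_cons, eq_comm]

-- the String-level fact: under the side conditions, dest is a token of parts
theorem dest_mem_parts (instr : String)
    (hin : ('=' : Char) ∈ instr.toList)
    (hws : (pvDest instr).toList.any PySem.Chars.isspace = false)
    (ht : PySem.Str.startswith (pvDest instr) "t" = true) :
    pvDest instr ∈ PySem.Str.split₀ (PySem.Str.replace instr "=" " = ") := by
  obtain ⟨b, hab, hna⟩ := first_eq_split instr.toList hin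
  have hdtl : (pvDest instr).toList
      = PySem.Chars.strip (instr.toList.takeWhile (fun c => c != '=')) :=
    pvDest_toList instr hin
  have hne : PySem.Chars.strip (instr.toList.takeWhile (fun c => c != '=')) ≠ [] := by
    rw [PySem.Str.startswith_eq, PySem.Chars.startswith_iff, hdtl] at ht
    intro hnil
    rw [hnil] at ht
    simpa using ht.length_le
  have hwsa : ∀ c ∈ PySem.Chars.strip (instr.toList.takeWhile (fun c => c != '=')),
      PySem.Chars.isspace c = false := by
    rw [hdtl] at hws
    exact fun c hc => Bool.eq_false_iff.mpr (List.any_eq_false.mp hws c hc)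
  have hmem : PySem.Chars.strip (instr.toList.takeWhile (fun c => c != '='))
      ∈ PySem.Chars.split₀ ((PySem.Str.replace instr "=" " = ").toList) := by
    rw [PySem.Str.toList_replace,
      show ("=" : String).toList = ['='] from rfl,
      show (" = " : String).toList = [' ', '=', ' '] from rfl,
      show PySem.Chars.replace instr.toList ['='] [' ', '=', ' ']
        = PySem.Chars.replace (instr.toList.takeWhile (fun c => c != '=') ++ '=' :: b)
            ['='] [' ', '=', ' '] from by rw [← hab]]
    exact dest_mem_split₀_replace _ b hna hwsa hne
  rw [← PySem.Str.split₀_map_toList] at hmem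
  obtain ⟨p, hp, hpe⟩ := List.mem_map.mp hmem
  have hpd : p = pvDest instr := String.toList_inj.mp (hpe.trans hdtl.symm)
  rwa [hpd] at hp
theorem foldl_keep (used : PySem.Set String) (l acc : List String)
    (h : ∀ i ∈ l, ∀ r, pvKeepStep used r i = r ++ [i]) :
    l.foldl (pvKeepStep used) acc = acc ++ l := by
  induction l generalizing acc with
  | nil => simp
  | cons i rest ih =>
    simp only [List.foldl_cons]
    rw [h i (by simp) acc, ih _ (fun j hj => h j (by simp [hj]))]
    simp

theorem foldl_keep_len (used : PySem.Set String) (l acc : List String) :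
    (l.foldl (pvKeepStep used) acc).length ≤ acc.length + l.length := by
  induction l generalizing acc with
  | nil => simp
  | cons i rest ih =>
    simp only [List.foldl_cons]
    refine le_trans (ih _) ?_
    have : (pvKeepStep used acc i).length ≤ acc.length + 1 := by
      unfold pvKeepStep
      split
      · split <;> simp
      · simp
    simp only [List.length_cons]
    omega
-- every instruction outside the change region is kept by the second pass
theorem keep_of_not_D (instrs : List String) (hnD : ¬ D_remove_dead_code instrs)
    (i : String) (hi : i ∈ instrs) (r : List String) :
    pvKeepStep (instrs.foldl pvUsedStep PySem.Set.empty) r i = r ++ [i] := by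
  unfold pvKeepStep
  by_cases hc : (PySem.Str.isIn "=" i && !PySem.Str.endswith i ":") = true
  · rw [if_pos hc]
    obtain ⟨h1, h2⟩ := Bool.and_eq_true_iff.mp hc
    have h2' : PySem.Str.endswith i ":" = false := by
      cases hh : PySem.Str.endswith i ":"
      · rfl
      · rw [hh] at h2; exact absurd h2 (by decide)
    have m1 : ('=' : Char) ∈ i.toList := (isIn_eq_iff_mem i).mp h1
    by_cases ht : PySem.Str.startswith (pvDest i) "t" = true
    · have hws : (pvDest i).toList.any PySem.Chars.isspace = false := by
        cases hh : (pvDest i).toList.any PySem.Chars.isspace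
        · rfl
        · refine absurd ⟨i, hi, m1, ?_, ?_, ?_⟩ hnD
          · intro hg
            rw [(endswith_colon_iff i).mpr hg] at h2'
            cases h2'
          · rw [← pvDest_toList i m1]
            exact (startswith_t_iff _).mp ht
          · rw [← pvDest_toList i m1]
            exact hh
      have hdest := dest_mem_parts i m1 hws ht
      have hmem : pvDest i ∈ instrs.foldl pvUsedStep PySem.Set.empty :=
        mem_foldl_pvUsedStep instrs _ i _ hi
          (fun u => dest_mem_pvUsedStep u i _ hdest ht)
      have hcont : PySem.Set.contains (instrs.foldl pvUsedStep PySem.Set.empty) (pvDest i)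
          = true := (PySem.Set.contains_iff _ _).mpr hmem
      rw [if_neg (by rw [ht, hcont]; decide)]
    · have htf : PySem.Str.startswith (pvDest i) "t" = false := by
        cases hh : PySem.Str.startswith (pvDest i) "t"
        · rfl
        · exact absurd hh ht
      rw [if_neg (by rw [htf]; simp)]
  · rw [if_neg hc]
theorem sgo_ws_free (s cur : List Char) (acc : List (List Char))
    (hcur : ∀ c ∈ cur, PySem.Chars.isspace c = false)
    (hacc : ∀ t ∈ acc, ∀ c ∈ t, PySem.Chars.isspace c = false) :
    ∀ t ∈ PySem.Chars.split₀.go s cur acc, ∀ c ∈ t, PySem.Chars.isspace c = false := by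
  induction s generalizing cur acc with
  | nil =>
    simp only [PySem.Chars.split₀.go]
    split_ifs with h
    · intro t htm
      exact hacc t (List.mem_reverse.mp htm)
    · intro t htm
      rcases List.mem_cons.mp (List.mem_reverse.mp htm) with he | he
      · subst he
        intro c hcm
        exact hcur c (List.mem_reverse.mp hcm)
      · exact hacc t he
  | cons c rest ih =>
    by_cases hs : PySem.Chars.isspace c
    · simp only [PySem.Chars.split₀.go, hs, if_true]
      split_ifs with h
      · exact ih [] acc (by simp) hacc
      · refine ih [] (cur.reverse :: acc) (by simp) ?_
        intro t htm
        rcases List.mem_cons.mp htm with he | he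
        · subst he
          intro d hd
          exact hcur d (List.mem_reverse.mp hd)
        · exact hacc t he
    · simp only [PySem.Chars.split₀.go, hs, Bool.false_eq_true, if_false]
      refine ih (c :: cur) acc ?_ hacc
      intro d hd
      rcases List.mem_cons.mp hd with he | he
      · subst he
        exact Bool.eq_false_iff.mpr hs
      · exact hcur d he
theorem str_split₀_ws_free (s : String) :
    ∀ w ∈ PySem.Str.split₀ s, w.toList.any PySem.Chars.isspace = false := by
  intro w hw
  unfold PySem.Str.split₀ at hw
  obtain ⟨t, ht, hte⟩ := List.mem_map.mp hw
  have hfree := sgo_ws_free s.toList [] [] (by simp) (by simp) t ht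
  rw [← hte, show (String.ofList t).toList = t by simp]
  exact List.any_eq_false.mpr (fun c hc => by rw [hfree c hc]; exact Bool.false_ne_true)

theorem pyGet?_mem {α : Type} (xs : List α) (n : Int) (w : α)
    (h : PySem.List.pyGet? xs n = some w) : w ∈ xs := by
  unfold PySem.List.pyGet? at h
  cases hk : PySem.List.pyIdx? xs.length n with
  | none => rw [hk] at h; cases h
  | some k =>
    rw [hk] at h
    exact List.mem_of_getElem? h
theorem mem_pvAddTok (u : PySem.Set String) (o : Option String) (y : String)
    (h : y ∈ pvAddTok u o) : y ∈ u ∨ o = some y := by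
  cases o with
  | none => exact Or.inl h
  | some w =>
    rcases (PySem.Set.mem_add _ _ _).mp h with hu | he
    · exact Or.inl hu
    · exact Or.inr (by rw [he])

theorem mem_foldl_filter_add_rec (l : List String) (u : PySem.Set String) (y : String)
    (f : String → Bool)
    (h : y ∈ l.foldl (fun u p => if f p then PySem.Set.add u p else u) u) :
    y ∈ u ∨ y ∈ l := by
  induction l generalizing u with
  | nil => exact Or.inl h
  | cons p rest ih =>
    simp only [List.foldl_cons] at h
    rcases ih _ h with hu | hl
    · by_cases hf : f p
      · rw [if_pos hf] at hu
        rcases (PySem.Set.mem_add _ _ _).mp hu with h' | h'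
        · exact Or.inl h'
        · exact Or.inr (by simp [h'])
      · rw [if_neg hf] at hu
        exact Or.inl hu
    · exact Or.inr (by simp [hl])

theorem pvUsedStep_ws_free (u : PySem.Set String) (i : String)
    (h : ∀ y ∈ u, y.toList.any PySem.Chars.isspace = false) :
    ∀ y ∈ pvUsedStep u i, y.toList.any PySem.Chars.isspace = false := by
  intro y hy
  have hy' : y ∈ (PySem.Str.split₀ (PySem.Str.replace i "=" " = ")).foldl
      (fun used p => if PySem.Str.startswith p "t" then PySem.Set.add used p else used)
      (if PySem.Str.isIn "IF_FALSE" i then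
        pvAddTok
          (if PySem.Str.startswith i "PRINT" then
            pvAddTok u (PySem.List.pyGet? (PySem.Str.split₀ i) 1)
          else u)
          (PySem.List.pyGet? (PySem.Str.split₀ i) 1)
      else
        if PySem.Str.startswith i "PRINT" then
          pvAddTok u (PySem.List.pyGet? (PySem.Str.split₀ i) 1)
        else u) := hy
  have htok : ∀ (u' : PySem.Set String),
      (∀ z ∈ u', z.toList.any PySem.Chars.isspace = false) →
      ∀ z, z ∈ pvAddTok u' (PySem.List.pyGet? (PySem.Str.split₀ i) 1) →
      z.toList.any PySem.Chars.isspace = false := by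
    intro u' hu' z hm
    rcases mem_pvAddTok _ _ _ hm with hm' | hm'
    · exact hu' z hm'
    · exact str_split₀_ws_free i z (pyGet?_mem _ _ _ hm')
  rcases mem_foldl_filter_add_rec _ _ _ _ hy' with hbase | hparts
  · have hu1 : ∀ z ∈ (if PySem.Str.startswith i "PRINT" then
        pvAddTok u (PySem.List.pyGet? (PySem.Str.split₀ i) 1) else u),
        z.toList.any PySem.Chars.isspace = false := by
      split
      · exact htok u h
      · exact h
    split at hbase
    · exact htok _ hu1 y hbase
    · exact hu1 y hbase
  · exact str_split₀_ws_free _ y hparts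
theorem used_ws_free (instrs : List String) (u : PySem.Set String)
    (h : ∀ y ∈ u, y.toList.any PySem.Chars.isspace = false) :
    ∀ y ∈ instrs.foldl pvUsedStep u, y.toList.any PySem.Chars.isspace = false := by
  induction instrs generalizing u with
  | nil => exact h
  | cons i rest ih => exact ih _ (pvUsedStep_ws_free u i h)

-- ===== VERDICT (by name: the statement is the Claim_ definition above) =====
theorem remove_dead_code_spec : Claim_unchanged_remove_dead_code := by
  intro instrs _hdom _hpre hnD
  show remove_dead_code instrs = remove_dead_code_alt instrs
  unfold remove_dead_code remove_dead_code_alt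
  rw [foldl_keep _ _ _ (keep_of_not_D instrs hnD)]
  simp
theorem remove_dead_code_changed : Claim_changed_remove_dead_code := by
  unfold Claim_changed_remove_dead_code; decide
theorem remove_dead_code_tight : Claim_exact_remove_dead_code := by
  intro instrs _hdom _hpre hD
  obtain ⟨i, hi, m1, m2, m3, m4⟩ := hD
  have h1 : PySem.Str.isIn "=" i = true := (isIn_eq_iff_mem i).mpr m1
  have h2 : PySem.Str.endswith i ":" = false := by
    cases hh : PySem.Str.endswith i ":"
    · rfl
    · exact absurd ((endswith_colon_iff i).mp hh) m2
  have ht : PySem.Str.startswith (pvDest i) "t" = true := by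
    rw [startswith_t_iff, pvDest_toList i m1]
    exact m3
  have hany : (pvDest i).toList.any PySem.Chars.isspace = true := by
    rw [pvDest_toList i m1]
    exact m4
  show remove_dead_code instrs ≠ remove_dead_code_alt instrs
  unfold remove_dead_code remove_dead_code_alt
  intro heq
  have hlen := congrArg List.length heq
  set used := instrs.foldl pvUsedStep PySem.Set.empty with hu
  have hdrop : ∀ r, pvKeepStep used r i = r := by
    intro r
    have hcont : PySem.Set.contains used (pvDest i) = false := by
      cases hh : PySem.Set.contains used (pvDest i)
      · rfl
      · have hm := (PySem.Set.contains_iff _ _).mp hh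
        have hfree := used_ws_free instrs PySem.Set.empty
          (by intro y hy; cases hy) _ hm
        rw [hany] at hfree
        cases hfree
    unfold pvKeepStep
    rw [if_pos (by rw [h1, h2]; decide), if_pos (by rw [ht, hcont]; decide)]
  obtain ⟨l1, l2, hsplit⟩ := List.append_of_mem hi
  rw [hsplit, List.foldl_append, List.foldl_cons, hdrop] at hlen
  have hle := foldl_keep_len used l2 (List.foldl (pvKeepStep used) [] l1)
  have hle1 := foldl_keep_len used l1 ([] : List String)
  simp only [List.length_append, List.length_cons, List.length_nil] at hlen hle hle1
  omega
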